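-- pv_equiv track=rewrite | github.com/gablavoiie/MovieRecommender | coding.py | genre_encoding
-- ===== SOURCE A (Python) =====
-- def genre_encoding(str_of_genres):
--     master = ['action', 'adventure', 'animation', 'biography', 'comedy', 'crime', 'drama', 'family', 'fantasy', 'history', 'horror', 'music', 'musical', 'mystery', 'romance', 'sci-fi', 'sport', 'thriller', 'war', 'western']
--     list_of_genres = str_of_genres.split(",")
--     processed_list = []
--     for i in list_of_genres:
--         processed_list.append(i.strip().lower())
--     genre_vector = [0]*len(master)
--     for index, genre in enumerate(master):
--         if genre in processed_list:
--             genre_vector[index] = 1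
--     return genre_vector
-- ===== SOURCE B (Python) =====
-- def genre_encoding(str_of_genres):
--     master = ['action', 'adventure', 'animation', 'biography', 'comedy', 'crime', 'drama', 'family', 'fantasy', 'history', 'horror', 'music', 'musical', 'mystery', 'romance', 'sci-fi', 'sport', 'thriller', 'war', 'western']
--     index_of = {genre: i for i, genre in enumerate(master)}
--     genre_vector = [0] * len(master)
--     for token in str_of_genres.split(","):
--         idx = index_of.get(token.strip().lower())
--         if idx is not None:
--             genre_vector[idx] = 1
--     return genre_vector
-- ===== Notes on version B (the rewrite author's own statement) =====
-- stated objective: alternative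
-- what changed: B builds a genre-to-index dictionary once and loops over the input tokens, setting vector positions by direct lookup, instead of A's loop over the master list with a membership scan of the processed token list per genre.
import Mathlib
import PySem

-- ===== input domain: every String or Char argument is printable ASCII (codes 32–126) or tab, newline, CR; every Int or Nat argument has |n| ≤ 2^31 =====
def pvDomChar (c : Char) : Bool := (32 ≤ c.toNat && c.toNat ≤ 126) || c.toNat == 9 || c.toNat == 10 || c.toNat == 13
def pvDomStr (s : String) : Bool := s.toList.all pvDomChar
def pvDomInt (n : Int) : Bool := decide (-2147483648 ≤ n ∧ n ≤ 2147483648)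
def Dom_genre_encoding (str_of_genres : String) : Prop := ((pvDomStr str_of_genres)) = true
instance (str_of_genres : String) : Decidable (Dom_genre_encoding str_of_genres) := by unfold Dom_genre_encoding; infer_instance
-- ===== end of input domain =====

-- B replaces A's per-genre membership scan of the token list by a genre→index dictionary
-- built once and a single loop over the tokens (objective: alternative decomposition).

-- the fixed master genre list, shared verbatim by both ports
def pvMaster : List String := ["action", "adventure", "animation", "biography", "comedy", "crime", "drama", "family", "fantasy", "history", "horror", "music", "musical", "mystery", "romance", "sci-fi", "sport", "thriller", "war", "western"]

-- s.split(",") — sep "," ≠ "" so PySem.Str.split? is always `some`; the getD [] never fires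
def pvSplit (s : String) : List String := (PySem.Str.split? s ",").getD []

-- ===== PORT A =====
def genre_encoding (str_of_genres : String) : List Int :=
  let master := pvMaster
  let list_of_genres := pvSplit str_of_genres
  let processed_list := list_of_genres.foldl (fun acc i => acc ++ [PySem.Str.lower (PySem.Str.strip i)]) []
  let genre_vector := List.replicate master.length (0 : Int)
  -- `genre_vector[index] = 1`: index from enumerate is a nonnegative Int, so .toNat is exact
  (PySem.List.enumerate master).foldl
    (fun gv p => if processed_list.contains p.2 then gv.set p.1.toNat 1 else gv) genre_vector

-- ===== PORT B =====
-- {genre: i for i, genre in enumerate(master)}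
def pvIndexOf : PySem.Dict String Int :=
  (PySem.List.enumerate pvMaster).foldl (fun d p => d.insert p.2 p.1) PySem.Dict.empty

def genre_encoding_alt (str_of_genres : String) : List Int :=
  let genre_vector := List.replicate pvMaster.length (0 : Int)
  (pvSplit str_of_genres).foldl
    (fun gv token =>
      match pvIndexOf.get? (PySem.Str.lower (PySem.Str.strip token)) with
      | some idx => gv.set idx.toNat 1   -- idx is a nonnegative dict value, .toNat exact
      | none => gv)
    genre_vector

-- ===== PRECONDITION & SPEC =====
def Spec_genre_encoding (str_of_genres : String) (out : List Int) : Prop := out = genre_encoding_alt str_of_genres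
instance (str_of_genres : String) (out : List Int) : Decidable (Spec_genre_encoding str_of_genres out) := by unfold Spec_genre_encoding; infer_instance

-- ===== CLAIM (what is proved, stated in full; the proofs are below) =====
def Claim_equal_genre_encoding : Prop := ∀ (str_of_genres : String), Dom_genre_encoding str_of_genres → Spec_genre_encoding str_of_genres (genre_encoding str_of_genres)

-- ===== LEMMAS AND PROOFS =====

-- A's append loop builds the map of strip∘lower over the tokens
theorem pv_foldl_append_map {α β : Type} (f : α → β) :
    ∀ (l : List α) (acc : List β), l.foldl (fun a i => a ++ [f i]) acc = acc ++ l.map f := by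
  intro l
  induction l with
  | nil => simp
  | cons x xs ih => intro acc; simp [List.foldl_cons, ih]

-- every (key, value) pair of the index dict: value j is in range and the key is pvMaster[j]
theorem pv_items_spec : ∀ p ∈ pvIndexOf.items,
    0 ≤ p.2 ∧ p.2 < 20 ∧ pvMaster.getD p.2.toNat "" = p.1 := by decide

theorem pv_get_bound {t : String} {idx : Int} (h : pvIndexOf.get? t = some idx) :
    0 ≤ idx ∧ idx < 20 := by
  have hm := PySem.Dict.mem_items_of_get?_eq_some pvIndexOf h
  have := pv_items_spec _ hm
  exact ⟨this.1, this.2.1⟩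

theorem pv_get_key {t : String} {idx : Int} (h : pvIndexOf.get? t = some idx) :
    pvMaster.getD idx.toNat "" = t := by
  have hm := PySem.Dict.mem_items_of_get?_eq_some pvIndexOf h
  exact (pv_items_spec _ hm).2.2

theorem pv_get_master : ∀ j : Nat, j < 20 →
    pvIndexOf.get? (pvMaster.getD j "") = some (j : Int) := by decide

-- elementwise behaviour of A's enumerate loop
theorem pv_getD_eq (j : Nat) (h : j < pvMaster.length) : pvMaster.getD j "" = pvMaster[j] := by
  rw [List.getD_eq_getElem?_getD, List.getElem?_eq_getElem h]; rfl

theorem pvA_char (toks : List String) :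
    ∀ (gs : List String) (k : Int) (v : List Int) (j : Nat), 0 ≤ k →
      k.toNat + gs.length ≤ v.length →
      (((∃ i, ∃ _ : i < gs.length, j = k.toNat + i ∧ gs[i] ∈ toks) →
        ((PySem.List.enumerate gs k).foldl
          (fun gv p => if toks.contains p.2 then gv.set p.1.toNat 1 else gv) v)[j]? = some 1) ∧
       ((¬ ∃ i, ∃ _ : i < gs.length, j = k.toNat + i ∧ gs[i] ∈ toks) →
        ((PySem.List.enumerate gs k).foldl
          (fun gv p => if toks.contains p.2 then gv.set p.1.toNat 1 else gv) v)[j]? = v[j]?)) := by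
  intro gs
  induction gs with
  | nil =>
    intro k v j hk hlen
    constructor
    · rintro ⟨i, hi, _⟩; simp at hi
    · intro _; simp [PySem.List.enumerate_nil]
  | cons g gs ih =>
    intro k v j hk hlen
    rw [PySem.List.enumerate_cons]
    simp only [List.foldl_cons]
    have hk1 : (0:Int) ≤ k + 1 := by omega
    have hkn : (k+1).toNat = k.toNat + 1 := by omega
    simp only [List.length_cons] at hlen
    set v' : List Int := if toks.contains g then v.set k.toNat 1 else v with hv'
    have hlen' : v'.length = v.length := by
      rw [hv']; split <;> simp
    have hlen1 : (k+1).toNat + gs.length ≤ v'.length := by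
      rw [hlen', hkn]; omega
    obtain ⟨ih1, ih2⟩ := ih (k+1) v' j hk1 hlen1
    constructor
    · rintro ⟨i, hi, hji, hmem⟩
      cases i with
      | succ i' =>
        simp only [List.length_cons] at hi
        simp only [List.getElem_cons_succ] at hmem
        exact ih1 ⟨i', by omega, by omega, hmem⟩
      | zero =>
        simp only [List.getElem_cons_zero] at hmem
        have hc : toks.contains g = true := List.contains_iff_mem.mpr hmem
        have hjk : j = k.toNat := by omega
        by_cases htail : ∃ i, ∃ _ : i < gs.length, j = (k+1).toNat + i ∧ gs[i] ∈ toks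
        · exact ih1 htail
        · rw [ih2 htail, hv', if_pos hc, List.getElem?_set,
            if_pos hjk.symm, if_pos (by omega)]
    · intro hnone
      have htail : ¬ ∃ i, ∃ _ : i < gs.length, j = (k+1).toNat + i ∧ gs[i] ∈ toks := by
        rintro ⟨i, hi, hji, hmem⟩
        exact hnone ⟨i + 1, by simp [Nat.succ_lt_succ hi], by omega, by simpa using hmem⟩
      rw [ih2 htail, hv']
      split
      · rename_i hc
        have hjk : j ≠ k.toNat := fun hjk =>
          hnone ⟨0, by simp, by omega, by simpa using List.contains_iff_mem.mp hc⟩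
        rw [List.getElem?_set, if_neg (fun h => hjk h.symm)]
      · rfl

-- elementwise behaviour of B's token loop
theorem pvB_char (j : Nat) :
    ∀ (toks : List String) (v : List Int),
      (((∃ t ∈ toks, pvIndexOf.get? t = some (j : Int)) → j < v.length →
        (toks.foldl (fun gv t =>
          match pvIndexOf.get? t with
          | some idx => gv.set idx.toNat 1
          | none => gv) v)[j]? = some 1) ∧
       ((¬ ∃ t ∈ toks, pvIndexOf.get? t = some (j : Int)) →
        (toks.foldl (fun gv t =>
          match pvIndexOf.get? t with
          | some idx => gv.set idx.toNat 1
          | none => gv) v)[j]? = v[j]?)) := by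
  intro toks
  induction toks with
  | nil =>
    intro v
    constructor
    · rintro ⟨t, ht, _⟩; simp at ht
    · intro _; simp
  | cons t ts ih =>
    intro v
    simp only [List.foldl_cons]
    constructor
    · rintro ⟨t', ht', hget⟩ hjv
      rcases List.mem_cons.mp ht' with rfl | htail
      · -- the head token maps to j
        have hred : (match pvIndexOf.get? t' with
            | some idx => v.set idx.toNat 1 | none => v) = v.set j 1 := by
          rw [hget]
          have hj : ((j:Int)).toNat = j := by omega
          simp [hj]
        rw [hred]
        by_cases hts : ∃ u ∈ ts, pvIndexOf.get? u = some (j : Int)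
        · exact (ih _).1 hts (by simpa using hjv)
        · rw [(ih _).2 hts, List.getElem?_set]
          simp [hjv]
      · -- a later token maps to j
        cases hcase : pvIndexOf.get? t with
        | none => exact (ih v).1 ⟨t', htail, hget⟩ hjv
        | some idx =>
          exact (ih _).1 ⟨t', htail, hget⟩ (by simpa using hjv)
    · intro hnone
      have htail : ¬ ∃ u ∈ ts, pvIndexOf.get? u = some (j : Int) := by
        rintro ⟨u, hu, hg⟩; exact hnone ⟨u, List.mem_cons_of_mem _ hu, hg⟩
      cases hcase : pvIndexOf.get? t with
      | none => exact (ih v).2 htail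
      | some idx =>
        have hne : idx.toNat ≠ j := by
          have hb := pv_get_bound hcase
          intro hEq
          exact hnone ⟨t, List.mem_cons_self, by
            rw [hcase]
            congr 1
            omega⟩
        rw [(ih _).2 htail, List.getElem?_set, if_neg hne]

-- the two per-position conditions coincide
theorem pv_cond_iff (toks : List String) (j : Nat) (hj : j < 20) :
    (∃ t ∈ toks, pvIndexOf.get? t = some (j : Int)) ↔ pvMaster.getD j "" ∈ toks := by
  constructor
  · rintro ⟨t, ht, hget⟩
    have hk := pv_get_key hget
    have hjn : ((j:Int)).toNat = j := by omega
    rw [hjn] at hk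
    rw [hk]; exact ht
  · intro hmem
    exact ⟨pvMaster.getD j "", hmem, pv_get_master j hj⟩

-- ===== VERDICT (by name: the statement is the Claim_ definition above) =====
theorem genre_encoding_spec : Claim_equal_genre_encoding := by
  intro s _
  unfold Spec_genre_encoding genre_encoding genre_encoding_alt
  simp only [pv_foldl_append_map, List.nil_append]
  set toks : List String := (pvSplit s).map (fun i => PySem.Str.lower (PySem.Str.strip i)) with htoks
  have hBfold : (pvSplit s).foldl
      (fun gv token =>
        match pvIndexOf.get? (PySem.Str.lower (PySem.Str.strip token)) with
        | some idx => gv.set idx.toNat 1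
        | none => gv) (List.replicate pvMaster.length (0:Int))
      = toks.foldl (fun gv t =>
        match pvIndexOf.get? t with
        | some idx => gv.set idx.toNat 1
        | none => gv) (List.replicate pvMaster.length (0:Int)) := by
    rw [htoks, List.foldl_map]
  rw [hBfold]
  apply List.ext_getElem?
  intro j
  have hml : pvMaster.length = 20 := by decide
  have hA := pvA_char toks pvMaster 0 (List.replicate pvMaster.length (0:Int)) j (by omega)
    (by simp)
  have hB := pvB_char j toks (List.replicate pvMaster.length (0:Int))
  by_cases hj : j < 20
  · have hcj := pv_cond_iff toks j hj
    have hgd : pvMaster.getD j "" = pvMaster[j]'(by omega) := pv_getD_eq j (by omega)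
    by_cases hmem : pvMaster.getD j "" ∈ toks
    · have hAcond : ∃ i, ∃ _ : i < pvMaster.length, j = (0:Int).toNat + i ∧ pvMaster[i] ∈ toks :=
        ⟨j, by omega, by omega, by rw [← hgd]; exact hmem⟩
      rw [hA.1 hAcond, hB.1 (hcj.mpr hmem) (by simp [hml, hj])]
    · have hAcond : ¬ ∃ i, ∃ _ : i < pvMaster.length, j = (0:Int).toNat + i ∧ pvMaster[i] ∈ toks := by
        rintro ⟨i, hi, hji, hm⟩
        have hij : i = j := by omega
        subst hij
        rw [← pv_getD_eq i hi] at hm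
        exact hmem hm
      rw [hA.2 hAcond, hB.2 (fun h => hmem (hcj.mp h))]
  · have hAcond : ¬ ∃ i, ∃ _ : i < pvMaster.length, j = (0:Int).toNat + i ∧ pvMaster[i] ∈ toks := by
      rintro ⟨i, hi, hji, _⟩
      rw [hml] at hi; omega
    have hBcond : ¬ ∃ t ∈ toks, pvIndexOf.get? t = some (j : Int) := by
      rintro ⟨t, ht, hget⟩
      have := pv_get_bound hget
      omega
    rw [hA.2 hAcond, hB.2 hBcond]
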